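-- pv_equiv track=rewrite | github.com/MayeZero/py_laboratory | algorithm/count.py | count
-- ===== SOURCE A (Python) =====
-- def count(arr):
--     total = 0
--     if len(arr) == 0:
--         return 0
--     else:
--         arr.pop(0)
--         total=1+count(arr)
--     return total
-- ===== SOURCE B (Python) =====
-- def count(arr):
--     # Iterative loop popping from the END: same return value (original length),
--     # same observable side effect (arr is emptied), O(n) instead of O(n^2).
--     total = 0
--     while arr:
--         arr.pop()
--         total += 1
--     return total
-- ===== Notes on version B (the rewrite author's own statement) =====
-- stated objective: faster
-- what changed: Replaced head-recursion with pop(0) by an iterative loop popping from the end, removing the quadratic element-shifting cost while still emptying arr and returning its original length.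
import Mathlib
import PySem

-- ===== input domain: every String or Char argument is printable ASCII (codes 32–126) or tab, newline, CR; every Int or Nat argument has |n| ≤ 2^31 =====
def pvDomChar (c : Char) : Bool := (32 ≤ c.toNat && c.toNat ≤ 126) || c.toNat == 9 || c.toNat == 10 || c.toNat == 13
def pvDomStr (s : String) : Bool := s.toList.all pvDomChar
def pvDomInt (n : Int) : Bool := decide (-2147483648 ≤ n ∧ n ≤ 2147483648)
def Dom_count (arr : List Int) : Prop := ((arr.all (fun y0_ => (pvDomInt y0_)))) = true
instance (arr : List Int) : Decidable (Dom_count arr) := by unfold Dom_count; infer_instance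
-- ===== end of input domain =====

-- B replaces A's head-recursion (pop(0)) by an iterative loop popping from the END:
-- same return value and both empty arr; the Lean equivalence is about the return value.

-- ===== PORT A =====
-- A: if arr empty return 0, else pop the front element and recurse on the rest.
def count (arr : List Int) : Int :=
  match arr with
  | [] => 0
  | _ :: rest => 1 + count rest

-- ===== PORT B =====
-- B: while arr nonempty, pop the LAST element and increment total.
def countAltLoop (arr : List Int) (total : Int) : Int :=
  if arr = [] then total
  else countAltLoop arr.dropLast (total + 1)
termination_by arr.length
decreasing_by
  have h : arr ≠ [] := by assumption
  simpa [List.length_dropLast] using Nat.sub_lt (List.length_pos_iff.mpr h) Nat.one_pos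

def count_alt (arr : List Int) : Int := countAltLoop arr 0

-- ===== PRECONDITION & SPEC =====
def Spec_count (arr : List Int) (out : Int) : Prop := out = count_alt arr
instance (arr : List Int) (out : Int) : Decidable (Spec_count arr out) := by unfold Spec_count; infer_instance

-- ===== CLAIM (what is proved, stated in full; the proofs are below) =====
def Claim_equal_count : Prop := ∀ (arr : List Int), Dom_count arr → Spec_count arr (count arr)

-- ===== LEMMAS AND PROOFS =====
theorem countAltLoop_eq (arr : List Int) (total : Int) :
    countAltLoop arr total = total + arr.length := by
  induction arr using List.reverseRecOn generalizing total with
  | nil => simp [countAltLoop]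
  | append_singleton xs x ih =>
    rw [countAltLoop]
    rw [if_neg (by simp)]
    rw [List.dropLast_concat, ih]
    simp; ring

theorem count_eq_length (arr : List Int) : count arr = arr.length := by
  induction arr with
  | nil => simp [count]
  | cons x t ih => simp [count, ih]; omega

-- ===== VERDICT (by name: the statement is the Claim_ definition above) =====
theorem count_spec : Claim_equal_count := by
  intro arr _
  unfold Spec_count count_alt
  rw [count_eq_length, countAltLoop_eq]
  simp
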